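-- pv_equiv track=rewrite | github.com/Sanghyeok-Jeon/Algorithms_Python | 백준/Silver/23757. 아이들과 선물 상자/아이들과 선물 상자.py | can_distribute_gifts
-- ===== SOURCE A (Python) =====
-- import heapq
--
-- def can_distribute_gifts(n, m, boxes, children):
--     max_heap = [-box for box in boxes]
--     heapq.heapify(max_heap)
--
--     for child in children:
--         largest_box = -heapq.heappop(max_heap)
--
--         if largest_box < child:
--             return False
--
--         heapq.heappush(max_heap, -(largest_box - child))
--
--     return True
-- ===== SOURCE B (Python) =====
-- def can_distribute_gifts(n, m, boxes, children):
--     boxes = list(boxes)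
--     for child in children:
--         largest = boxes[0]
--         for b in boxes:
--             if b > largest:
--                 largest = b
--         if largest < child:
--             return False
--         boxes[boxes.index(largest)] = largest - child
--     return True
-- ===== Notes on version B (the rewrite author's own statement) =====
-- stated objective: simpler
-- what changed: Replaces the heapq max-heap (negated values, heapify/heappop/heappush) with a plain mutable list: each child triggers a linear scan for the current maximum, which is decremented in place; no priority structure is maintained.
import Mathlib
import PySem

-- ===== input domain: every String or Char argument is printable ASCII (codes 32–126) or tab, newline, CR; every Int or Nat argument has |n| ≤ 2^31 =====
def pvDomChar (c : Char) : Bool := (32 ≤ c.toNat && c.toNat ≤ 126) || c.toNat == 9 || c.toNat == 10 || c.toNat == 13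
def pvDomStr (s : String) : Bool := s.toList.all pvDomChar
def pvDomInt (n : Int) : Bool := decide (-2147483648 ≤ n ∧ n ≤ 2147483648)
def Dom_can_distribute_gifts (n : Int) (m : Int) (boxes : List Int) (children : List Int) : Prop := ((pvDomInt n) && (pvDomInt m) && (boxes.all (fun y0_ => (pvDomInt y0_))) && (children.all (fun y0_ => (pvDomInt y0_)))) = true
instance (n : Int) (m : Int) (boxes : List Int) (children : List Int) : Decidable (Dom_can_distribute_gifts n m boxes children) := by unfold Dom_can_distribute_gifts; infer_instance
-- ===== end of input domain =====

-- B replaces A's heapq max-heap with a plain list that is re-scanned for its maximum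
-- for every child (simpler: no priority structure); return values proved equal on Pre_.

-- ===== PORT A =====
-- heapq.heappop on a heap of Ints pops a minimal element; modelled as multiset pop-min
-- (exact: only the popped values and the surviving multiset affect A's Bool result).
def pvHeapPop? (heap : List Int) : Option (Int × List Int) :=
  match heap.min? with
  | none => none            -- heappop from an empty heap: IndexError (outside Pre_)
  | some v => some (v, heap.erase v)

def pvALoop (heap : List Int) (children : List Int) : Bool :=
  match children with
  | [] => true
  | c :: cs =>
    match pvHeapPop? heap with
    | none => false          -- IndexError region, excluded by Pre_
    | some (mn, rest) =>
      let largest := -mn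
      if largest < c then false
      else pvALoop ((-(largest - c)) :: rest) cs

def can_distribute_gifts (n : Int) (m : Int) (boxes : List Int) (children : List Int) : Bool :=
  pvALoop (boxes.map (fun box => -box)) children

-- ===== PORT B =====
-- largest = boxes[0]; for b in boxes: if b > largest: largest = b
def pvFindMax (boxes : List Int) (largest : Int) : Int :=
  boxes.foldl (fun a b => if b > a then b else a) largest

def pvBLoop (boxes : List Int) (children : List Int) : Bool :=
  match children with
  | [] => true
  | c :: cs =>
    match boxes with
    | [] => false            -- boxes[0]: IndexError (outside Pre_)
    | b0 :: _ =>
      let largest := pvFindMax boxes b0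
      if largest < c then false
      else
        match PySem.List.index? boxes largest with
        | some i => pvBLoop (boxes.set i (largest - c)) cs
        | none => false      -- unreachable: largest is an element of boxes

def can_distribute_gifts_alt (n : Int) (m : Int) (boxes : List Int) (children : List Int) : Bool :=
  pvBLoop boxes children

-- ===== PRECONDITION & SPEC =====
-- Pre_ excludes only the inputs where A raises IndexError (heappop from an empty
-- heap): empty boxes with a nonempty children list. B raises IndexError there too.
def Pre_can_distribute_gifts (n : Int) (m : Int) (boxes : List Int) (children : List Int) : Prop :=
  boxes = [] → children = []
instance (n : Int) (m : Int) (boxes : List Int) (children : List Int) : Decidable (Pre_can_distribute_gifts n m boxes children) := by unfold Pre_can_distribute_gifts; infer_instance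

def pvWitness_can_distribute_gifts : Int × Int × List Int × List Int := (2, 2, [10, 3], [4, 5])

def Spec_can_distribute_gifts (n : Int) (m : Int) (boxes : List Int) (children : List Int) (out : Bool) : Prop := out = can_distribute_gifts_alt n m boxes children
instance (n : Int) (m : Int) (boxes : List Int) (children : List Int) (out : Bool) : Decidable (Spec_can_distribute_gifts n m boxes children out) := by unfold Spec_can_distribute_gifts; infer_instance

-- ===== CLAIM (what is proved, stated in full; the proofs are below) =====
def Claim_equal_can_distribute_gifts : Prop := ∀ (n : Int) (m : Int) (boxes : List Int) (children : List Int), Dom_can_distribute_gifts n m boxes children → Pre_can_distribute_gifts n m boxes children → Spec_can_distribute_gifts n m boxes children (can_distribute_gifts n m boxes children)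

-- ===== LEMMAS AND PROOFS =====

-- B's scan step is `max`.
theorem pv_step_eq_max (a b : Int) : (if b > a then b else a) = max a b := by
  rcases le_or_gt b a with h | h
  · simp [max_def]; omega
  · simp [max_def]; omega

theorem pvFindMax_eq_foldl_max (bs : List Int) (a : Int) :
    pvFindMax bs a = bs.foldl max a := by
  unfold pvFindMax
  congr 1
  funext x y
  exact pv_step_eq_max x y

-- min? is invariant under permutation (for Int).
theorem pv_min?_perm {l₁ l₂ : List Int} (h : l₁.Perm l₂) : l₁.min? = l₂.min? := by
  cases h₁ : l₁.min? with
  | none =>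
    have : l₁ = [] := List.min?_eq_none_iff.mp h₁
    subst this
    have : l₂ = [] := h.symm.eq_nil
    simp [this]
  | some a =>
    rw [List.min?_eq_some_iff] at h₁
    symm
    rw [List.min?_eq_some_iff]
    exact ⟨h.mem_iff.mp h₁.1, fun b hb => h₁.2 b (h.mem_iff.mpr hb)⟩

-- min? of the negated list is the negated max?.
theorem pv_min?_map_neg (l : List Int) :
    (l.map (fun x => -x)).min? = l.max?.map (fun x => -x) := by
  cases l with
  | nil => simp
  | cons a as =>
    simp only [List.map_cons, List.min?_cons', List.max?_cons', Option.map_some]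
    congr 1
    induction as generalizing a with
    | nil => simp
    | cons b bs ih =>
      simp only [List.map_cons, List.foldl_cons]
      rw [min_neg_neg, ih]

-- replacing the first occurrence of a (found by index?) by v is, as a multiset,
-- removing a and adding v.
theorem pv_set_index_perm : ∀ (l : List Int) (a v : Int) (i : Nat),
    PySem.List.index? l a = some i → (l.set i v).Perm (v :: l.erase a) := by
  intro l
  induction l with
  | nil => intro a v i h; simp [PySem.List.index?_eq_idxOf?, List.idxOf?] at h
  | cons b t ih =>
    intro a v i h
    by_cases hb : b = a
    · subst hb
      rw [PySem.List.index?_cons_self] at h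
      cases h
      simp [List.erase_cons_head]
    · rw [PySem.List.index?_cons_of_ne t hb] at h
      cases ht : PySem.List.index? t a with
      | none => rw [ht] at h; simp at h
      | some j =>
        rw [ht] at h
        simp only [Option.map_some, Option.some.injEq] at h
        subst h
        have := ih a v j ht
        rw [List.set_cons_succ, List.erase_cons_tail (by simpa using hb)]
        exact (this.cons b).trans (List.Perm.swap v b _)

-- Main invariant: A's heap is the negated multiset of B's boxes.
theorem pv_loop_eq : ∀ (cs heap bs : List Int),
    heap.Perm (bs.map (fun x => -x)) → pvALoop heap cs = pvBLoop bs cs := by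
  intro cs
  induction cs with
  | nil => intro heap bs _; rfl
  | cons c cs ih =>
    intro heap bs hperm
    cases bs with
    | nil =>
      have : heap = [] := by simpa using hperm.eq_nil
      subst this
      simp [pvALoop, pvBLoop, pvHeapPop?]
    | cons b0 bt =>
      have hmax : (b0 :: bt).max? = some (List.foldl max b0 bt) := List.max?_cons'
      set M := List.foldl max b0 bt with hM
      have hmin : heap.min? = some (-M) := by
        rw [pv_min?_perm hperm, pv_min?_map_neg, hmax]; rfl
      have hMmem : M ∈ b0 :: bt := List.max?_mem hmax
      have hfind : pvFindMax (b0 :: bt) b0 = M := by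
        rw [pvFindMax_eq_foldl_max]
        simp [hM, List.foldl_cons]
      simp only [pvALoop, pvBLoop, pvHeapPop?, hmin, hfind]
      rw [neg_neg]
      by_cases hc : M < c
      · simp [hc]
      · simp only [hc, if_false]
        obtain ⟨i, hi⟩ := Option.isSome_iff_exists.mp
          ((PySem.List.index?_isSome_iff _ _).mpr hMmem)
        rw [hi]
        apply ih
        have h1 : ((b0 :: bt).set i (M - c)).Perm ((M - c) :: (b0 :: bt).erase M) :=
          pv_set_index_perm _ _ _ _ hi
        have hinj : Function.Injective (fun x : Int => -x) := fun a b hab => by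
          simpa using hab
        have h2 : (((b0 :: bt).set i (M - c)).map (fun x => -x)).Perm
            ((-(M - c)) :: ((b0 :: bt).map (fun x => -x)).erase (-M)) := by
          have h3 := h1.map (fun x => -x)
          rwa [List.map_cons, List.map_erase hinj] at h3
        exact ((hperm.erase (-M)).cons _).trans h2.symm

-- ===== VERDICT (by name: the statement is the Claim_ definition above) =====
theorem can_distribute_gifts_spec : Claim_equal_can_distribute_gifts := by
  intro n m boxes children _ hpre
  unfold Spec_can_distribute_gifts can_distribute_gifts can_distribute_gifts_alt
  exact pv_loop_eq children _ boxes (List.Perm.refl _)
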